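-- pv_equiv track=rewrite | github.com/x1f4r/music-fetch | src/music_fetch/identity.py | identity_tier
-- ===== SOURCE A (Python) =====
-- PROVIDER_ID_PREFIXES: list[tuple[str, str]] = [
--     # Order matters: we prefer the most trustworthy/specific IDs first.
--     ("acrcloud", "acr"),
--     ("audd", "audd"),
--     ("shazam", "shz"),
--     ("catalog", "cat"),
-- ]
--
-- def identity_tier(key: str) -> str:
--     """Recover the tier label from an identity key produced by ``tiered_identity``.
--
--     Useful for observability so we can SQL for "what fraction of merges were
--     tier-C fuzzy?"
--     """
--     if key.startswith("isrc::"):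
--         return "isrc"
--     for _pid_key, prefix in PROVIDER_ID_PREFIXES:
--         if key.startswith(f"{prefix}::"):
--             return "provider_id"
--     if key.startswith("fuzzy::"):
--         return "fuzzy"
--     return "unknown"
-- ===== SOURCE B (Python) =====
-- def identity_tier(key: str) -> str:
--     scheme, sep, _ = key.partition("::")
--     if not sep:
--         return "unknown"
--     if scheme == "isrc":
--         return "isrc"
--     if scheme in {"acr", "audd", "shz", "cat"}:
--         return "provider_id"
--     if scheme == "fuzzy":
--         return "fuzzy"
--     return "unknown"
-- ===== Notes on version B (the rewrite author's own statement) =====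
-- stated objective: simpler
-- what changed: B parses the key once with key.partition('::') and dispatches on the extracted scheme (set membership for the provider prefixes), instead of A's ordered chain of startswith guards plus a loop over the prefix table.
import Mathlib
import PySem

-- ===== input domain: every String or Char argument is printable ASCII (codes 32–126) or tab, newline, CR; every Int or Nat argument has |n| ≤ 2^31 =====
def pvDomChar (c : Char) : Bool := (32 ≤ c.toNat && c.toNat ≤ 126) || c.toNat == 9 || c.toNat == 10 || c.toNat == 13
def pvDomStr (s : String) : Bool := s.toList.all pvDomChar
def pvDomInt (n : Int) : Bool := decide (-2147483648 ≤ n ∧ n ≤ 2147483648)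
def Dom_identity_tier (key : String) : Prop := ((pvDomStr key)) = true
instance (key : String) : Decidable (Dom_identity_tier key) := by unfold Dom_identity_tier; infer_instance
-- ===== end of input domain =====

-- B replaces A's ordered startswith guards and prefix loop by a single partition-at-'::' then
-- a dispatch on the extracted scheme (objective: simpler).

-- ===== PORT A =====
def pvProviderIdPrefixes : List (String × String) :=
  [("acrcloud", "acr"), ("audd", "audd"), ("shazam", "shz"), ("catalog", "cat")]

def pvProviderLoop (key : String) : List (String × String) → Option String
  | [] => none
  | (_, pre) :: rest =>
      if PySem.Str.startswith key (pre ++ "::") then some "provider_id"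
      else pvProviderLoop key rest

def identity_tier (key : String) : String :=
  if PySem.Str.startswith key "isrc::" then "isrc"
  else
    match pvProviderLoop key pvProviderIdPrefixes with
    | some r => r
    | none =>
        if PySem.Str.startswith key "fuzzy::" then "fuzzy"
        else "unknown"

-- ===== PORT B =====
def identity_tier_alt (key : String) : String :=
  -- scheme, sep, _ = key.partition("::"); if not sep: return "unknown"
  let f := PySem.Str.find key "::"
  if f = -1 then "unknown"
  else
    let scheme := key.toList.take f.toNat
    if scheme = "isrc".toList then "isrc"
    else if ["acr", "audd", "shz", "cat"].any (fun p => scheme = p.toList) then "provider_id"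
    else if scheme = "fuzzy".toList then "fuzzy"
    else "unknown"

-- ===== PRECONDITION & SPEC =====
def Spec_identity_tier (key : String) (out : String) : Prop := out = identity_tier_alt key
instance (key : String) (out : String) : Decidable (Spec_identity_tier key out) := by unfold Spec_identity_tier; infer_instance

-- ===== CLAIM (what is proved, stated in full; the proofs are below) =====
def Claim_equal_identity_tier : Prop := ∀ (key : String), Dom_identity_tier key → Spec_identity_tier key (identity_tier key)

-- ===== LEMMAS AND PROOFS =====

-- startswith (p ++ "::") holds iff "::" occurs and the part before its first occurrence is p
lemma pv_sw_iff (l p : List Char) (hp : (':' : Char) ∉ p) :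
    PySem.Chars.startswith l (p ++ [':', ':']) = true ↔
      (0 ≤ PySem.Chars.find l [':', ':'] ∧
        l.take (PySem.Chars.find l [':', ':']).toNat = p) := by
  constructor
  · intro h
    rw [PySem.Chars.startswith_iff] at h
    obtain ⟨t, ht⟩ := h
    have hl : l = p ++ (':' :: ':' :: t) := by
      rw [← ht]; simp
    have hocc : [':', ':'] <+: l.drop p.length := by
      rw [hl, List.drop_left]
      exact ⟨t, rfl⟩
    have h0 : 0 ≤ PySem.Chars.find l [':', ':'] := by
      rw [PySem.Chars.find_nonneg_iff]
      exact hocc.isInfix.trans (List.drop_suffix _ _).isInfix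
    obtain ⟨hpref, hmin⟩ := PySem.Chars.find_spec (s := l) (sub := [':', ':']) h0
    have hle : (PySem.Chars.find l [':', ':']).toNat ≤ p.length := by
      by_contra hgt
      exact hmin p.length (by omega) hocc
    set n := (PySem.Chars.find l [':', ':']).toNat with hn
    have hge : p.length ≤ n := by
      by_contra hlt
      push Not at hlt
      obtain ⟨t', ht'⟩ := hpref
      have hcol : l[n]? = some ':' := by
        have h1 : (l.drop n)[0]? = l[n]? := by simp
        rw [← h1, ← ht']
        rfl
      have hmem : l[n]? = p[n]? := by
        rw [hl, List.getElem?_append_left hlt]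
      have hpn : p[n]? = some ':' := by rw [← hmem]; exact hcol
      exact hp (List.mem_of_getElem? hpn)
    have heq : n = p.length := le_antisymm hle hge
    refine ⟨h0, ?_⟩
    rw [heq, hl, List.take_left]
  · rintro ⟨h0, htake⟩
    obtain ⟨hpref, -⟩ := PySem.Chars.find_spec (s := l) (sub := [':', ':']) h0
    obtain ⟨t', ht'⟩ := hpref
    rw [PySem.Chars.startswith_iff]
    refine ⟨t', ?_⟩
    calc p ++ [':', ':'] ++ t'
        = l.take (PySem.Chars.find l [':', ':']).toNat ++ ([':', ':'] ++ t') := by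
          rw [htake]; simp
      _ = l := by rw [ht', List.take_append_drop]

lemma pv_sw_none (l p : List Char) (h0 : PySem.Chars.find l [':', ':'] = -1) :
    PySem.Chars.startswith l (p ++ [':', ':']) = false := by
  rw [← Bool.not_eq_true, PySem.Chars.startswith_iff]
  intro h
  obtain ⟨t, ht⟩ := h
  have hocc : [':', ':'] <+: l.drop p.length := by
    have hl : l = p ++ (':' :: ':' :: t) := by rw [← ht]; simp
    rw [hl, List.drop_left]; exact ⟨t, rfl⟩
  have : 0 ≤ PySem.Chars.find l [':', ':'] := by
    rw [PySem.Chars.find_nonneg_iff]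
    exact hocc.isInfix.trans (List.drop_suffix _ _).isInfix
  omega

lemma pv_sw_eq (l p : List Char) (hp : (':' : Char) ∉ p)
    (h0 : 0 ≤ PySem.Chars.find l [':', ':']) :
    PySem.Chars.startswith l (p ++ [':', ':']) =
      decide (l.take (PySem.Chars.find l [':', ':']).toNat = p) := by
  by_cases hc : l.take (PySem.Chars.find l [':', ':']).toNat = p
  · simp only [hc, decide_true]
    exact (pv_sw_iff l p hp).mpr ⟨h0, hc⟩
  · simp only [hc, decide_false]
    rw [← Bool.not_eq_true]
    intro h
    exact hc ((pv_sw_iff l p hp).mp h).2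

-- ===== VERDICT (by name: the statement is the Claim_ definition above) =====
theorem identity_tier_spec : Claim_equal_identity_tier := by
  intro key _
  unfold Spec_identity_tier identity_tier identity_tier_alt
  simp only [pvProviderLoop, pvProviderIdPrefixes]
  have hisrc : ("isrc::" : String).toList = ['i','s','r','c'] ++ [':',':'] := rfl
  have hacr : ("acr" ++ "::" : String).toList = ['a','c','r'] ++ [':',':'] := rfl
  have haudd : ("audd" ++ "::" : String).toList = ['a','u','d','d'] ++ [':',':'] := rfl
  have hshz : ("shz" ++ "::" : String).toList = ['s','h','z'] ++ [':',':'] := rfl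
  have hcat : ("cat" ++ "::" : String).toList = ['c','a','t'] ++ [':',':'] := rfl
  have hfuzzy : ("fuzzy::" : String).toList = ['f','u','z','z','y'] ++ [':',':'] := rfl
  have hsep : ("::" : String).toList = [':',':'] := rfl
  rw [PySem.Str.startswith_eq, PySem.Str.startswith_eq, PySem.Str.startswith_eq,
      PySem.Str.startswith_eq, PySem.Str.startswith_eq, PySem.Str.startswith_eq,
      PySem.Str.find_eq, hisrc, hacr, haudd, hshz, hcat, hfuzzy, hsep]
  set l := key.toList with hlk
  by_cases h0 : PySem.Chars.find l [':',':'] = -1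
  · rw [pv_sw_none l _ h0, pv_sw_none l _ h0, pv_sw_none l _ h0,
        pv_sw_none l _ h0, pv_sw_none l _ h0, pv_sw_none l _ h0]
    simp [h0]
  · have h0' : 0 ≤ PySem.Chars.find l [':',':'] := by
      have := PySem.Chars.neg_one_le_find l [':',':']
      omega
    rw [pv_sw_eq l _ (by decide) h0', pv_sw_eq l _ (by decide) h0',
        pv_sw_eq l _ (by decide) h0', pv_sw_eq l _ (by decide) h0',
        pv_sw_eq l _ (by decide) h0', pv_sw_eq l _ (by decide) h0']
    simp only [h0, if_false]
    set s := l.take (PySem.Chars.find l [':',':']).toNat with hs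
    by_cases e1 : s = ['i','s','r','c'] <;>
      by_cases e2 : s = ['a','c','r'] <;>
      by_cases e3 : s = ['a','u','d','d'] <;>
      by_cases e4 : s = ['s','h','z'] <;>
      by_cases e5 : s = ['c','a','t'] <;>
      by_cases e6 : s = ['f','u','z','z','y'] <;>
      simp_all [List.any]
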